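-- pv_equiv track=rewrite | github.com/ori-yin/mcd-push-streamlit | app.py | ch_totals
-- ===== SOURCE A (Python) =====
-- def ch_totals(rows_raw, ch, dates):
--     t = {'click':0,'reach':0,'gc':0,'sales':0,'order_click':0,'reach_plan':0}
--     for d in dates:
--         if d not in rows_raw or ch not in rows_raw[d]:
--             continue
--         for pt, vals in rows_raw[d][ch].items():
--             for k in t:
--                 t[k] += vals.get(k, 0)
--     return t
-- ===== SOURCE B (Python) =====
-- def ch_totals(rows_raw, ch, dates):
--     KEYS = ('click', 'reach', 'gc', 'sales', 'order_click', 'reach_plan')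
--     # stage 1: flatten the selected per-point value dicts into one list
--     points = [vals
--               for d in dates
--               for vals in rows_raw.get(d, {}).get(ch, {}).values()]
--
--     def merge(u, v):
--         return {k: u[k] + v[k] for k in KEYS}
--
--     # stage 2: balanced divide-and-conquer reduction of points[lo:hi]
--     def total(lo, hi):
--         if hi - lo == 0:
--             return dict.fromkeys(KEYS, 0)
--         if hi - lo == 1:
--             vals = points[lo]
--             return {k: vals.get(k, 0) for k in KEYS}
--         mid = (lo + hi) // 2
--         return merge(total(lo, mid), total(mid, hi))
--
--     return total(0, len(points))
-- ===== Notes on version B (the rewrite author's own statement) =====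
-- stated objective: alternative
-- what changed: Replaces A's single linear stateful pass (a totals dict bumped for each point in turn) by a two-stage algorithm: stage 1 flattens the selected per-point value dicts into one list, stage 2 computes the totals by balanced divide-and-conquer, recursively merging subtotal dicts of the two halves (correct because integer addition is associative).
import Mathlib
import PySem

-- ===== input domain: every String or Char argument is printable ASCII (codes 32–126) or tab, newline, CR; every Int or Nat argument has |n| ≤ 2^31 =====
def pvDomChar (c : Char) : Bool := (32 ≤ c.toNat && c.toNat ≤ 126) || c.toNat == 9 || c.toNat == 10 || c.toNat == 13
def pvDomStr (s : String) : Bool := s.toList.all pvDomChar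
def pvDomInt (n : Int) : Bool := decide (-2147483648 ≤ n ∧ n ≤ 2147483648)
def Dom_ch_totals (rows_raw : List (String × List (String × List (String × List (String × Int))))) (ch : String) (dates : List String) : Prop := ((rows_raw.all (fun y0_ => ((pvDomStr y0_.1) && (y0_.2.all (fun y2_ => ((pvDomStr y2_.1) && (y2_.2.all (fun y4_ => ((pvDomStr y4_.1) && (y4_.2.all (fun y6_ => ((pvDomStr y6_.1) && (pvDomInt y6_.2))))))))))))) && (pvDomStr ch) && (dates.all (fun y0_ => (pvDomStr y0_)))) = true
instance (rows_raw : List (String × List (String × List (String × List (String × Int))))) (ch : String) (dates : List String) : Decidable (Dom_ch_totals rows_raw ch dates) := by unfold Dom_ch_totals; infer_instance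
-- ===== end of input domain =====

-- B replaces A's single linear stateful pass (dict accumulator bumped per point) by a two-stage
-- algorithm: flatten the selected per-point dicts into one list, then reduce it by balanced
-- divide-and-conquer merging of subtotal dicts (objective: alternative; same asymptotic cost).


-- ===== PORT A =====
-- per-date body of A's loop: 'if d not in rows_raw or ch not in rows_raw[d]: continue' then
-- 'for pt, vals in rows_raw[d][ch].items(): for k in t: t[k] += vals.get(k, 0)'
def chTotalsStep (rows_raw : List (String × List (String × List (String × List (String × Int))))) (ch : String)
    (t : PySem.Dict String Int) (d : String) : PySem.Dict String Int :=
  match (PySem.Dict.mk rows_raw).get? d with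
  | none => t
  | some row =>
    match (PySem.Dict.mk row).get? ch with
    | none => t
    | some pts =>
      (PySem.Dict.mk pts).items.foldl (fun t pv =>
        t.keys.foldl (fun t k => t.modify k 0 (fun x => x + (PySem.Dict.mk pv.2).getD k 0)) t) t

def ch_totals (rows_raw : List (String × List (String × List (String × List (String × Int))))) (ch : String) (dates : List String) : List (String × Int) :=
  let t0 : PySem.Dict String Int :=
    PySem.Dict.mk [("click", 0), ("reach", 0), ("gc", 0), ("sales", 0), ("order_click", 0), ("reach_plan", 0)]
  (dates.foldl (chTotalsStep rows_raw ch) t0).items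

-- ===== PORT B =====
def chMetricKeys : List String := ["click", "reach", "gc", "sales", "order_click", "reach_plan"]

-- stage 1: 'points = [vals for d in dates for vals in rows_raw.get(d, {}).get(ch, {}).values()]'
def chPoints (rows_raw : List (String × List (String × List (String × List (String × Int))))) (ch : String)
    (dates : List String) : List (List (String × Int)) :=
  dates.flatMap (fun d =>
    (PySem.Dict.mk ((PySem.Dict.mk ((PySem.Dict.mk rows_raw).getD d [])).getD ch [])).values)

-- 'def merge(u, v): return {k: u[k] + v[k] for k in KEYS}'  (both operands always carry all six keys)
def chMerge (u v : List (String × Int)) : List (String × Int) :=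
  chMetricKeys.map (fun k => (k, (PySem.Dict.mk u).getD k 0 + (PySem.Dict.mk v).getD k 0))

-- stage 2: 'def total(lo, hi): …' — balanced divide-and-conquer reduction of points[lo:hi];
-- 'points[lo]' is in range whenever B calls it, so the none branch is a totality guard only
def chTotalRec (points : List (List (String × Int))) (lo hi : Nat) : List (String × Int) :=
  if hi - lo = 0 then chMetricKeys.map (fun k => (k, (0 : Int)))
  else if hi - lo = 1 then
    match points[lo]? with
    | some vals => chMetricKeys.map (fun k => (k, (PySem.Dict.mk vals).getD k 0))
    | none => chMetricKeys.map (fun k => (k, (0 : Int)))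
  else
    chMerge (chTotalRec points lo ((lo + hi) / 2)) (chTotalRec points ((lo + hi) / 2) hi)
termination_by hi - lo
decreasing_by all_goals omega

def ch_totals_alt (rows_raw : List (String × List (String × List (String × List (String × Int))))) (ch : String) (dates : List String) : List (String × Int) :=
  let points := chPoints rows_raw ch dates
  chTotalRec points 0 points.length

-- ===== PRECONDITION & SPEC =====
def Spec_ch_totals (rows_raw : List (String × List (String × List (String × List (String × Int))))) (ch : String) (dates : List String) (out : List (String × Int)) : Prop := out = ch_totals_alt rows_raw ch dates
instance (rows_raw : List (String × List (String × List (String × List (String × Int))))) (ch : String) (dates : List String) (out : List (String × Int)) : Decidable (Spec_ch_totals rows_raw ch dates out) := by unfold Spec_ch_totals; infer_instance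

-- ===== CLAIM (what is proved, stated in full; the proofs are below) =====
def Claim_equal_ch_totals : Prop := ∀ (rows_raw : List (String × List (String × List (String × List (String × Int))))) (ch : String) (dates : List String), Dom_ch_totals rows_raw ch dates → Spec_ch_totals rows_raw ch dates (ch_totals rows_raw ch dates)

-- ===== LEMMAS AND PROOFS =====

-- per-key total of a list of value dicts (proof-side abbreviation)
def chSum (points : List (List (String × Int))) (j : String) : Int :=
  (points.map (fun vals => (PySem.Dict.mk vals).getD j 0)).sum

-- lookup in a dict literally built as 'ks.map (fun j => (j, f j))'
theorem chGetD_mk_map (ks : List String) (f : String → Int) (k : String) (hk : k ∈ ks) :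
    (PySem.Dict.mk (ks.map fun j => (j, f j))).getD k 0 = f k := by
  induction ks with
  | nil => cases hk
  | cons j ks ih =>
    by_cases h : j = k
    · subst h; simp [PySem.Dict.getD_eq_get?_getD, PySem.Dict.get?_mk_cons]
    · have hk' : k ∈ ks := by
        rcases List.mem_cons.mp hk with h2 | h2
        · exact absurd h2.symm h
        · exact h2
      have := ih hk'
      simp only [List.map_cons]
      rw [PySem.Dict.getD_eq_get?_getD, PySem.Dict.get?_mk_cons] at *
      simpa [h] using this

-- characterisation of B's divide-and-conquer: chTotalRec totals points[lo:hi] key by key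
theorem chTotalRec_eq (points : List (List (String × Int))) :
    ∀ n lo hi, hi - lo = n → lo ≤ hi → hi ≤ points.length →
      chTotalRec points lo hi =
        chMetricKeys.map (fun k => (k, chSum ((points.drop lo).take (hi - lo)) k)) := by
  intro n
  induction n using Nat.strong_induction_on with
  | _ n ih =>
    intro lo hi hn hlh hhl
    by_cases h0 : hi - lo = 0
    · rw [chTotalRec]
      simp [h0, chSum]
    · by_cases h1 : hi - lo = 1
      · have hlt : lo < points.length := by omega
        have hg : points[lo]? = some points[lo] := List.getElem?_eq_getElem hlt
        have hdrop : points.drop lo = points[lo] :: points.drop (lo + 1) :=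
          List.drop_eq_getElem_cons hlt
        rw [chTotalRec, hg]
        simp only [h1, chSum]
        rw [hdrop]
        simp only [List.take_succ_cons, List.take_zero, List.map_cons, List.map_nil,
          List.sum_cons, List.sum_nil, add_zero]
        norm_num
      · rw [chTotalRec]
        simp only [h0, h1, if_false]
        have hm1 : lo < (lo + hi) / 2 := by omega
        have hm2 : (lo + hi) / 2 < hi := by omega
        rw [ih ((lo + hi) / 2 - lo) (by omega) lo ((lo + hi) / 2) rfl (by omega) (by omega),
            ih (hi - (lo + hi) / 2) (by omega) ((lo + hi) / 2) hi rfl (by omega) hhl]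
        unfold chMerge
        refine List.map_congr_left ?_
        intro k hkm
        rw [chGetD_mk_map _ _ _ hkm, chGetD_mk_map _ _ _ hkm]
        have hsplit : (points.drop lo).take (hi - lo) =
            (points.drop lo).take ((lo + hi) / 2 - lo) ++ (points.drop ((lo + hi) / 2)).take (hi - (lo + hi) / 2) := by
          have h2 : points.drop ((lo + hi) / 2) = (points.drop lo).drop ((lo + hi) / 2 - lo) := by
            rw [List.drop_drop]
            congr 1
            omega
          rw [h2, ← List.take_add]
          congr 1
          omega
        rw [hsplit]
        simp [chSum]

-- A's innermost loop 'for k in t: t[k] += vals.get(k, 0)' over a key snapshot ks: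
-- keys are preserved and each key's value grows by v k (once, since ks is duplicate-free).
theorem chInnerFold (ks : List String) (v : String → Int) :
    ∀ (t : PySem.Dict String Int), ks.Nodup → (∀ k ∈ ks, t.contains k = true) →
      (ks.foldl (fun t k => t.modify k 0 (fun x => x + v k)) t).keys = t.keys ∧
      ∀ j, (ks.foldl (fun t k => t.modify k 0 (fun x => x + v k)) t).getD j 0 =
        t.getD j 0 + (if j ∈ ks then v j else 0) := by
  induction ks with
  | nil => intro t _ _; simp
  | cons k ks ih =>
    intro t hnd hc
    have hck : t.contains k = true := hc k (by simp)
    have hkeys : (t.modify k 0 (fun x => x + v k)).keys = t.keys := by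
      simp [PySem.Dict.keys_modify, PySem.Dict.keys_insert_of_contains, hck]
    have hc' : ∀ j ∈ ks, (t.modify k 0 (fun x => x + v k)).contains j = true := by
      intro j hj
      have := hc j (by simp [hj])
      simpa [PySem.Dict.contains_modify, hck] using Or.inr this
    obtain ⟨hk1, hk2⟩ := ih (t.modify k 0 (fun x => x + v k)) (List.nodup_cons.mp hnd).2 hc'
    refine ⟨by simpa [hkeys] using hk1, ?_⟩
    intro j
    have hd := hk2 j
    simp only [List.foldl_cons] at *
    rw [hd, PySem.Dict.getD_modify]
    by_cases hjk : j = k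
    · subst hjk
      have : j ∉ ks := (List.nodup_cons.mp hnd).1
      simp [this]
    · simp [hjk]

-- A's middle loop over the points of one date: each key of chMetricKeys gains that date's per-point sum.
theorem chPtsFold (pts : List (String × List (String × Int))) :
    ∀ (t : PySem.Dict String Int), t.keys = chMetricKeys →
      (pts.foldl (fun t pv => t.keys.foldl (fun t k => t.modify k 0 (fun x => x + (PySem.Dict.mk pv.2).getD k 0)) t) t).keys = chMetricKeys ∧
      ∀ j ∈ chMetricKeys,
        (pts.foldl (fun t pv => t.keys.foldl (fun t k => t.modify k 0 (fun x => x + (PySem.Dict.mk pv.2).getD k 0)) t) t).getD j 0 =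
          t.getD j 0 + (pts.map (fun pv => (PySem.Dict.mk pv.2).getD j 0)).sum := by
  induction pts with
  | nil => intro t ht; simpa using ht
  | cons pv pts ih =>
    intro t ht
    have hnd : t.keys.Nodup := by rw [ht]; decide
    have hcon : ∀ k ∈ t.keys, t.contains k = true := by
      intro k hk
      simp [PySem.Dict.contains_eq_decide_mem_keys, hk]
    obtain ⟨hk1, hk2⟩ := chInnerFold t.keys (fun k => (PySem.Dict.mk pv.2).getD k 0) t hnd hcon
    obtain ⟨hq1, hq2⟩ := ih _ (hk1.trans ht)
    refine ⟨by simpa using hq1, ?_⟩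
    intro j hj
    have := hq2 j hj
    simp only [List.foldl_cons, List.map_cons, List.sum_cons] at *
    rw [this, hk2 j]
    rw [ht]
    simp [hj]
    ring

-- A's loop over dates: each key of chMetricKeys gains exactly the flattened-list total chSum.
theorem chDatesFold (rows_raw : List (String × List (String × List (String × List (String × Int))))) (ch : String) (dates : List String) :
    ∀ (t : PySem.Dict String Int), t.keys = chMetricKeys →
      (dates.foldl (chTotalsStep rows_raw ch) t).keys = chMetricKeys ∧
      ∀ j ∈ chMetricKeys,
        (dates.foldl (chTotalsStep rows_raw ch) t).getD j 0 =
          t.getD j 0 + chSum (chPoints rows_raw ch dates) j := by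
  induction dates with
  | nil => intro t ht; refine ⟨ht, ?_⟩; intro j hj; simp [chSum, chPoints]
  | cons d ds ih =>
    intro t ht
    simp only [List.foldl_cons]
    have hPts : chPoints rows_raw ch (d :: ds) =
        (PySem.Dict.mk ((PySem.Dict.mk ((PySem.Dict.mk rows_raw).getD d [])).getD ch [])).values
          ++ chPoints rows_raw ch ds := by
      simp [chPoints]
    rcases hr : (PySem.Dict.mk rows_raw).get? d with _ | row
    · have hstep : chTotalsStep rows_raw ch t d = t := by simp [chTotalsStep, hr]
      have hg : (PySem.Dict.mk rows_raw).getD d [] = [] := by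
        rw [PySem.Dict.getD_eq_get?_getD, hr]; rfl
      have htot : chSum (chPoints rows_raw ch (d :: ds)) = chSum (chPoints rows_raw ch ds) := by
        funext j; rw [hPts, hg]; rfl
      rw [hstep, htot]
      exact ih t ht
    · have hrowD : (PySem.Dict.mk rows_raw).getD d [] = row :=
        PySem.Dict.getD_of_get?_eq_some _ [] hr
      rcases hc : (PySem.Dict.mk row).get? ch with _ | pts
      · have hstep : chTotalsStep rows_raw ch t d = t := by simp [chTotalsStep, hr, hc]
        have hg : (PySem.Dict.mk ((PySem.Dict.mk rows_raw).getD d [])).getD ch [] = [] := by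
          rw [hrowD, PySem.Dict.getD_eq_get?_getD, hc]; rfl
        have hg2 : (PySem.Dict.mk ((PySem.Dict.mk ((PySem.Dict.mk rows_raw).getD d [])).getD ch [])).values = [] := by
          rw [hg]; rfl
        have htot : chSum (chPoints rows_raw ch (d :: ds)) = chSum (chPoints rows_raw ch ds) := by
          funext j; rw [hPts, hg2]; simp [chSum]
        rw [hstep, htot]
        exact ih t ht
      · have hstep : chTotalsStep rows_raw ch t d =
            (PySem.Dict.mk pts).items.foldl (fun t pv =>
              t.keys.foldl (fun t k => t.modify k 0 (fun x => x + (PySem.Dict.mk pv.2).getD k 0)) t) t := by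
          simp [chTotalsStep, hr, hc]
        have hptsD : (PySem.Dict.mk ((PySem.Dict.mk ((PySem.Dict.mk rows_raw).getD d [])).getD ch [])).values
            = (PySem.Dict.mk pts).values := by
          rw [hrowD, PySem.Dict.getD_of_get?_eq_some _ [] hc]
        obtain ⟨hp1, hp2⟩ := chPtsFold (PySem.Dict.mk pts).items t ht
        obtain ⟨hq1, hq2⟩ := ih _ hp1
        rw [hstep]
        refine ⟨hq1, ?_⟩
        intro j hj
        rw [hq2 j hj, hp2 j hj]
        have htot : chSum (chPoints rows_raw ch (d :: ds)) j =
            ((PySem.Dict.mk pts).items.map (fun pv => (PySem.Dict.mk pv.2).getD j 0)).sum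
              + chSum (chPoints rows_raw ch ds) j := by
          rw [hPts]
          simp only [chSum, List.map_append, List.sum_append, hptsD]
          simp [PySem.Dict.values, List.map_map, Function.comp_def]
        rw [htot]
        ring

-- ===== VERDICT (by name: the statement is the Claim_ definition above) =====
theorem ch_totals_spec : Claim_equal_ch_totals := by
  intro rows_raw ch dates _
  unfold Spec_ch_totals ch_totals ch_totals_alt
  have h0 : (PySem.Dict.mk [("click", (0:Int)), ("reach", 0), ("gc", 0), ("sales", 0), ("order_click", 0), ("reach_plan", 0)]).keys = chMetricKeys := by decide
  obtain ⟨hk, hv⟩ := chDatesFold rows_raw ch dates _ h0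
  have hnd : (dates.foldl (chTotalsStep rows_raw ch)
      (PySem.Dict.mk [("click", (0:Int)), ("reach", 0), ("gc", 0), ("sales", 0), ("order_click", 0), ("reach_plan", 0)])).keys.Nodup := by
    rw [hk]; decide
  rw [PySem.Dict.items_eq_map_keys _ hnd 0, hk]
  rw [chTotalRec_eq (chPoints rows_raw ch dates) ((chPoints rows_raw ch dates).length - 0) 0
        (chPoints rows_raw ch dates).length rfl (Nat.zero_le _) le_rfl]
  simp only [List.drop_zero, Nat.sub_zero, List.take_length]
  refine List.map_congr_left ?_
  intro k hkm
  rw [hv k hkm]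
  have hz : (PySem.Dict.mk [("click", (0:Int)), ("reach", 0), ("gc", 0), ("sales", 0), ("order_click", 0), ("reach_plan", 0)]).getD k 0 = 0 := by
    fin_cases hkm <;> rfl
  rw [hz, zero_add]
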